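-- pv_equiv track=rewrite | github.com/ashgithub/ai_tools | src/ai_tools/utils/model_cache.py | _normalize_model_entries
-- ===== SOURCE A (Python) =====
-- from typing import Any
--
-- def _normalize_model_entries(raw_entries: list[dict[str, Any]]) -> list[dict[str, Any]]:
--     deduped: dict[str, dict[str, Any]] = {}
--     for item in raw_entries:
--         model_id = str(item.get("id", "")).strip()
--         if not model_id:
--             continue
--         display_name = str(item.get("display_name") or model_id).strip()
--         deduped[model_id] = {"id": model_id, "display_name": display_name}
--     return [deduped[k] for k in sorted(deduped.keys())]
-- ===== SOURCE B (Python) =====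
-- def _normalize_model_entries(raw_entries):
--     processed = []
--     for item in raw_entries:
--         model_id = str(item.get("id", "")).strip()
--         if not model_id:
--             continue
--         display_name = str(item.get("display_name") or model_id).strip()
--         processed.append((model_id, {"id": model_id, "display_name": display_name}))
--     processed.sort(key=lambda p: p[0])  # stable: equal ids keep input order
--     collapsed = []
--     for pair in processed:
--         if collapsed and collapsed[-1][0] == pair[0]:
--             collapsed[-1] = pair  # keep the LAST entry of each run of equal ids
--         else:
--             collapsed.append(pair)
--     return [d for _, d in collapsed]
-- ===== Notes on version B (the rewrite author's own statement) =====
-- stated objective: alternative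
-- what changed: Replaces the hash-map dedup followed by sorting the keys with a sort-then-scan strategy: normalize entries into (id, dict) pairs, stably sort them by id, and collapse each run of equal ids in one linear pass keeping the last entry.
import Mathlib
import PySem

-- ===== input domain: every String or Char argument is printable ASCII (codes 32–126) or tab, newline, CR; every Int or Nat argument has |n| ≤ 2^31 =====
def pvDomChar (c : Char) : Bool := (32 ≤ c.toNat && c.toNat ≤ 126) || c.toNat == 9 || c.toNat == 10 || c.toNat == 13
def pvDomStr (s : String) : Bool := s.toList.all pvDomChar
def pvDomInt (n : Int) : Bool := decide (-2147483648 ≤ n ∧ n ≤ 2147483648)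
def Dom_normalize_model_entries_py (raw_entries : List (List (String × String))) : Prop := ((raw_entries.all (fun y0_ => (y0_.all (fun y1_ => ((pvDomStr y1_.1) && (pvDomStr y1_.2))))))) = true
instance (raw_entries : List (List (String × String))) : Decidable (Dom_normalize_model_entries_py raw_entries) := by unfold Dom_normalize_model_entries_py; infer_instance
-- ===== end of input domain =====

-- B replaces A's hash-map dedup + key sort by normalize-then-stable-sort-then-collapse-runs (keep last); same result, similar cost.

-- shared normalization of one entry (both Pythons contain this identical code):
-- model_id = str(item.get("id","")).strip(); display_name = str(item.get("display_name") or model_id).strip()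
-- (values are strings on this signature, so str() is the identity; `x or model_id` = model_id when the key is
-- missing (None) or its value is the empty string)
def pvNorm (item : List (String × String)) : String × List (String × String) :=
  let model_id := PySem.Str.strip ((PySem.Dict.mk item).getD "id" "")
  let dn0 := (PySem.Dict.mk item).getD "display_name" ""
  let display_name := PySem.Str.strip (if dn0 = "" then model_id else dn0)
  (model_id, [("id", model_id), ("display_name", display_name)])

-- ===== PORT A =====
-- `deduped[k]` is ported as getD k [] — exact, since every k comes from deduped.keys (no KeyError is reachable)
def normalize_model_entries_py (raw_entries : List (List (String × String))) : List (List (String × String)) :=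
  let deduped := raw_entries.foldl (fun d item =>
    let n := pvNorm item
    if n.1 = "" then d else d.insert n.1 n.2) PySem.Dict.empty
  (PySem.List.sorted deduped.keys (fun k => k)).map (fun k => deduped.getD k [])

-- ===== PORT B =====
-- collapsed[-1] / append step of Source B's second loop
def pvStep (acc : List (String × List (String × String))) (p : String × List (String × String)) :
    List (String × List (String × String)) :=
  match acc.getLast? with
  | some q => if q.1 = p.1 then acc.dropLast ++ [p] else acc ++ [p]
  | none => [p]

def normalize_model_entries_py_alt (raw_entries : List (List (String × String))) : List (List (String × String)) :=
  let processed := raw_entries.foldl (fun acc item =>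
    let n := pvNorm item
    if n.1 = "" then acc else acc ++ [n]) []
  let sortedp := PySem.List.sorted processed (fun p => p.1)
  (sortedp.foldl pvStep []).map (fun p => p.2)

-- ===== PRECONDITION & SPEC =====
def Spec_normalize_model_entries_py (raw_entries : List (List (String × String))) (out : List (List (String × String))) : Prop := out = normalize_model_entries_py_alt raw_entries
instance (raw_entries : List (List (String × String))) (out : List (List (String × String))) : Decidable (Spec_normalize_model_entries_py raw_entries out) := by unfold Spec_normalize_model_entries_py; infer_instance

-- ===== CLAIM (what is proved, stated in full; the proofs are below) =====
def Claim_equal_normalize_model_entries_py : Prop := ∀ (raw_entries : List (List (String × String))), Dom_normalize_model_entries_py raw_entries → Spec_normalize_model_entries_py raw_entries (normalize_model_entries_py raw_entries)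

-- ===== LEMMAS AND PROOFS =====

-- the processed pair list both programs effectively work from
def pvPs (raw : List (List (String × String))) : List (String × List (String × String)) :=
  (raw.filter (fun it => !((pvNorm it).1 == ""))).map pvNorm

-- forward collapse of runs of equal keys, keeping the last element of each run
def pvCollapse : List (String × List (String × String)) → List (String × List (String × String))
  | [] => []
  | [p] => [p]
  | p :: q :: rest => if p.1 = q.1 then pvCollapse (q :: rest) else p :: pvCollapse (q :: rest)


lemma pvB_processed (raw : List (List (String × String)))
    (acc : List (String × List (String × String))) :
    raw.foldl (fun acc item => let n := pvNorm item; if n.1 = "" then acc else acc ++ [n]) acc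
      = acc ++ pvPs raw := by
  induction raw generalizing acc with
  | nil => simp [pvPs]
  | cons a t ih =>
    simp only [List.foldl_cons, pvPs, List.filter_cons]
    by_cases h : (pvNorm a).1 = ""
    · simp [h, ih, pvPs]
    · simp [h, ih, pvPs]

lemma pvA_dict (raw : List (List (String × String))) (d : PySem.Dict String (List (String × String))) :
    raw.foldl (fun d item => let n := pvNorm item; if n.1 = "" then d else d.insert n.1 n.2) d
      = (pvPs raw).foldl (fun d p => d.insert p.1 p.2) d := by
  induction raw generalizing d with
  | nil => simp [pvPs]
  | cons a t ih =>
    simp only [List.foldl_cons, pvPs, List.filter_cons]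
    by_cases h : (pvNorm a).1 = ""
    · simp [h, ih, pvPs]
    · simp [h, ih, pvPs]

lemma pvGetD_fold (ps : List (String × List (String × String)))
    (d : PySem.Dict String (List (String × String))) (k : String) :
    ((ps.foldl (fun d p => d.insert p.1 p.2) d).getD k [])
      = (((ps.filter (fun p => p.1 == k)).getLast?).map Prod.snd).getD (d.getD k []) := by
  induction ps generalizing d with
  | nil => simp
  | cons p t ih =>
    simp only [List.foldl_cons, List.filter_cons, ih]
    by_cases h : p.1 = k
    · simp only [h, beq_self_eq_true, if_pos]
      rcases hfe : t.filter (fun p => p.1 == k) with _ | ⟨a, b⟩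
      · simp [hfe]
      · rcases hgl : (a :: b).getLast? with _ | q
        · simp at hgl
        · simp [hfe, List.getLast?_cons_cons, hgl]
    · have hb : (p.1 == k) = false := by simp [h]
      have hk : ¬ (k = p.1) := fun hk => h hk.symm
      simp [hb, PySem.Dict.getD_insert, hk]

lemma pvFilt_insertBy (x : String × List (String × String))
    (ys : List (String × List (String × String))) (k : String)
    (h : ys.Pairwise (fun a b => a.1 ≤ b.1)) :
    (PySem.List.insertBy (fun a b => decide (a.1 < b.1)) x ys).filter (fun p => p.1 == k)
      = ys.filter (fun p => p.1 == k) ++ if x.1 == k then [x] else [] := by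
  induction ys with
  | nil =>
    show [x].filter (fun p => p.1 == k) = [] ++ if x.1 == k then [x] else []
    by_cases hxk : x.1 = k <;> simp [hxk]
  | cons y t ih =>
    have hy : ∀ z ∈ t, y.1 ≤ z.1 := (List.pairwise_cons.mp h).1
    have ht : t.Pairwise (fun a b => a.1 ≤ b.1) := (List.pairwise_cons.mp h).2
    show (if (decide (x.1 < y.1)) = true then x :: y :: t
          else y :: PySem.List.insertBy (fun a b => decide (a.1 < b.1)) x t).filter (fun p => p.1 == k) = _
    by_cases hlt : x.1 < y.1
    · simp only [hlt, decide_true, if_pos]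
      by_cases hxk : x.1 = k
      · have hfe : (y :: t).filter (fun p => p.1 == k) = [] := by
          apply List.filter_eq_nil_iff.mpr
          intro z hz
          have hzge : y.1 ≤ z.1 := by
            rcases List.mem_cons.mp hz with rfl | hz'
            · exact le_refl _
            · exact hy z hz'
          simp only [beq_iff_eq]
          intro hc
          have hxz : x.1 < z.1 := lt_of_lt_of_le hlt hzge
          rw [hc, hxk] at hxz
          exact lt_irrefl _ hxz
        rw [List.filter_cons_of_pos (by simp [hxk]), hfe]
        simp [hxk]
      · rw [List.filter_cons_of_neg (by simp [hxk])]
        simp [hxk]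
    · simp only [hlt, decide_false, Bool.false_eq_true, if_neg, not_false_iff]
      rw [List.filter_cons, List.filter_cons, ih ht]
      by_cases hyk : y.1 = k <;> simp [hyk]

lemma pvFilter_sorted (ps : List (String × List (String × String))) (k : String) :
    (PySem.List.sorted ps (fun p => p.1)).filter (fun p => p.1 == k)
      = ps.filter (fun p => p.1 == k) := by
  induction ps using List.reverseRecOn with
  | nil => rfl
  | append_singleton xs x ih =>
    have hstep : PySem.List.sorted (xs ++ [x]) (fun p => p.1)
        = PySem.List.insertBy (fun a b => decide (a.1 < b.1)) x
            (PySem.List.sorted xs (fun p => p.1)) := by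
      rw [PySem.List.sorted_eq_foldl_insertBy, List.foldl_append,
          ← PySem.List.sorted_eq_foldl_insertBy]
      rfl
    rw [hstep, pvFilt_insertBy x _ k (PySem.List.sorted_pairwise xs (fun p => p.1)),
        ih, List.filter_append]
    by_cases hxk : x.1 = k <;> simp [hxk]

lemma pvFold_step_aux (s : List (String × List (String × String)))
    (acc : List (String × List (String × String))) (p : String × List (String × String)) :
    s.foldl pvStep (acc ++ [p]) = acc ++ pvCollapse (p :: s) := by
  induction s generalizing acc p with
  | nil => simp [pvCollapse]
  | cons q rest ih =>
    simp only [List.foldl_cons]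
    have hstep : pvStep (acc ++ [p]) q =
        if p.1 = q.1 then acc ++ [q] else (acc ++ [p]) ++ [q] := by
      simp [pvStep]
    rw [hstep]
    by_cases hpq : p.1 = q.1
    · rw [if_pos hpq, ih, pvCollapse, if_pos hpq]
    · rw [if_neg hpq, ih, pvCollapse, if_neg hpq]
      simp
lemma pvFold_step_eq_collapse (s : List (String × List (String × String))) :
    s.foldl pvStep [] = pvCollapse s := by
  cases s with
  | nil => rfl
  | cons p t =>
    have := pvFold_step_aux t [] p
    simpa using this

lemma pvCollapse_subset {s : List (String × List (String × String))}
    {r : String × List (String × String)} (h : r ∈ pvCollapse s) : r ∈ s := by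
  induction s with
  | nil => simp [pvCollapse] at h
  | cons p t ih =>
    cases t with
    | nil => simpa [pvCollapse] using h
    | cons q rest =>
      rw [pvCollapse] at h
      by_cases hpq : p.1 = q.1
      · rw [if_pos hpq] at h
        exact List.mem_cons_of_mem _ (ih h)
      · rw [if_neg hpq] at h
        rcases List.mem_cons.mp h with rfl | h'
        · exact List.mem_cons_self
        · exact List.mem_cons_of_mem _ (ih h')

lemma pvMem_keys_collapse (s : List (String × List (String × String))) (k : String) :
    k ∈ (pvCollapse s).map Prod.fst ↔ k ∈ s.map Prod.fst := by
  induction s with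
  | nil => simp [pvCollapse]
  | cons p t ih =>
    cases t with
    | nil => simp [pvCollapse]
    | cons q rest =>
      rw [pvCollapse]
      by_cases hpq : p.1 = q.1
      · rw [if_pos hpq]
        rw [ih]
        simp [hpq]
      · rw [if_neg hpq]
        simp only [List.map_cons, List.mem_cons, ih]

lemma pvCollapse_pairwise_lt (s : List (String × List (String × String)))
    (h : s.Pairwise (fun a b => a.1 ≤ b.1)) :
    (pvCollapse s).Pairwise (fun a b => a.1 < b.1) := by
  induction s with
  | nil => simp [pvCollapse]
  | cons p t ih =>
    have hp : ∀ z ∈ t, p.1 ≤ z.1 := (List.pairwise_cons.mp h).1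
    have ht : t.Pairwise (fun a b => a.1 ≤ b.1) := (List.pairwise_cons.mp h).2
    cases t with
    | nil => simp [pvCollapse]
    | cons q rest =>
      rw [pvCollapse]
      by_cases hpq : p.1 = q.1
      · rw [if_pos hpq]; exact ih ht
      · rw [if_neg hpq]
        refine List.pairwise_cons.mpr ⟨?_, ih ht⟩
        intro r hr
        have hrm : r ∈ q :: rest := pvCollapse_subset hr
        have hqr : q.1 ≤ r.1 := by
          rcases List.mem_cons.mp hrm with rfl | hr'
          · exact le_refl _
          · exact (List.pairwise_cons.mp ht).1 r hr'
        exact lt_of_lt_of_le (lt_of_le_of_ne (hp q List.mem_cons_self) hpq) hqr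

lemma pvCollapse_last (s : List (String × List (String × String)))
    (h : s.Pairwise (fun a b => a.1 ≤ b.1))
    {r : String × List (String × String)} (hr : r ∈ pvCollapse s) :
    (s.filter (fun p => p.1 == r.1)).getLast? = some r := by
  induction s with
  | nil => simp [pvCollapse] at hr
  | cons p t ih =>
    have hp : ∀ z ∈ t, p.1 ≤ z.1 := (List.pairwise_cons.mp h).1
    have ht : t.Pairwise (fun a b => a.1 ≤ b.1) := (List.pairwise_cons.mp h).2
    cases t with
    | nil =>
      simp [pvCollapse] at hr
      subst hr
      simp
    | cons q rest =>
      rw [pvCollapse] at hr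
      by_cases hpq : p.1 = q.1
      · rw [if_pos hpq] at hr
        have hlast := ih ht hr
        by_cases hpr : p.1 = r.1
        · rw [List.filter_cons_of_pos (by simp [hpr])]
          have hne : (q :: rest).filter (fun p => p.1 == r.1) ≠ [] := by
            intro hnil; rw [hnil] at hlast; simp at hlast
          rcases hfe : (q :: rest).filter (fun p => p.1 == r.1) with _ | ⟨a, b⟩
          · exact absurd hfe hne
          · rw [hfe] at hlast
            rw [hfe, List.getLast?_cons_cons, hlast]
        · rw [List.filter_cons_of_neg (by simp [hpr])]
          exact hlast
      · rw [if_neg hpq] at hr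
        have hq : ∀ z ∈ q :: rest, q.1 ≤ z.1 := by
          intro z hz
          rcases List.mem_cons.mp hz with rfl | hz'
          · exact le_refl _
          · exact (List.pairwise_cons.mp ht).1 z hz'
        rcases List.mem_cons.mp hr with rfl | hr'
        · rw [List.filter_cons_of_pos (by simp)]
          have hfe : (q :: rest).filter (fun p => p.1 == r.1) = [] := by
            apply List.filter_eq_nil_iff.mpr
            intro z hz
            simp only [beq_iff_eq]
            intro hc
            have h1 : q.1 ≤ z.1 := hq z hz
            rw [hc] at h1
            exact hpq (le_antisymm (hp q List.mem_cons_self) h1)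
          rw [hfe]
          rfl
        · have hrq : q.1 ≤ r.1 := hq r (pvCollapse_subset hr')
          have hpr : ¬ (p.1 = r.1) := by
            intro hc
            rw [← hc] at hrq
            exact hpq (le_antisymm (hp q List.mem_cons_self) hrq)
          rw [List.filter_cons_of_neg (by simp [hpr])]
          exact ih ht hr'

lemma pvKeys_sorted (s : List (String × List (String × String)))
    (h : s.Pairwise (fun a b => a.1 ≤ b.1)) :
    PySem.List.sorted (PySem.Set.ofList (s.map Prod.fst)) (fun k => k)
      = (pvCollapse s).map Prod.fst := by
  have hplt : ((pvCollapse s).map Prod.fst).Pairwise (fun a b => a < b) :=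
    List.pairwise_map.mpr (pvCollapse_pairwise_lt s h)
  apply PySem.List.sorted_eq_of_perm_of_pairwise_lt
  · apply (List.perm_ext_iff_of_nodup ?_ (PySem.Set.nodup_ofList _)).mpr
    · intro a
      rw [pvMem_keys_collapse]
      exact (PySem.Set.mem_ofList _ _).symm
    · exact hplt.imp (fun hab => ne_of_lt hab)
  · exact hplt

lemma pvKeys_dict (ps : List (String × List (String × String))) :
    ((ps.foldl (fun d p => d.insert p.1 p.2)
        (PySem.Dict.empty : PySem.Dict String (List (String × String)))).keys)
      = PySem.Set.ofList (ps.map Prod.fst) := by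
  have h := PySem.Dict.keys_foldl_insert_key (ν := List (String × String)) ps Prod.fst
    (fun _ p => p.2) PySem.Dict.empty
  simpa [PySem.Dict.keys_empty, PySem.Set.update_nil_left] using h

-- ===== VERDICT (by name: the statement is the Claim_ definition above) =====
theorem normalize_model_entries_py_spec : Claim_equal_normalize_model_entries_py := by
  intro raw _hdom
  show normalize_model_entries_py raw = normalize_model_entries_py_alt raw
  rw [normalize_model_entries_py, normalize_model_entries_py_alt]
  rw [pvA_dict, pvB_processed]
  simp only [List.nil_append]
  set ps := pvPs raw with hps
  set s := PySem.List.sorted ps (fun p => p.1) with hs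
  have hpair : s.Pairwise (fun a b => a.1 ≤ b.1) := PySem.List.sorted_pairwise ps (fun p => p.1)
  rw [pvFold_step_eq_collapse, pvKeys_dict]
  have hperm : s.Perm ps := PySem.List.sorted_perm ps (fun p => p.1) false
  have hof : (PySem.Set.ofList (ps.map Prod.fst)).Perm (PySem.Set.ofList (s.map Prod.fst)) := by
    apply (List.perm_ext_iff_of_nodup (PySem.Set.nodup_ofList _) (PySem.Set.nodup_ofList _)).mpr
    intro a
    rw [PySem.Set.mem_ofList, PySem.Set.mem_ofList]
    exact ((hperm.map Prod.fst).mem_iff).symm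
  rw [PySem.List.sorted_eq_sorted_of_perm _ _ (fun k => k) (fun _ _ hab => hab) hof,
      pvKeys_sorted s hpair, List.map_map]
  apply List.map_congr_left
  intro r hr
  show (ps.foldl (fun d p => d.insert p.1 p.2) PySem.Dict.empty).getD r.1 [] = r.2
  rw [pvGetD_fold, PySem.Dict.getD_empty, ← pvFilter_sorted ps r.1, ← hs,
      pvCollapse_last s hpair hr]
  rfl
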